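-- pv_equiv track=rewrite | github.com/sergeevvvv/streamlit-example | streamlit_app.py | simple_latex_splitter
-- ===== SOURCE A (Python) =====
-- def simple_latex_splitter(t_raw):
--     #t_raw = '\\gcd(a,b)=\\prod _{p}p^{\\min(a_{p},b_{p})}'
--     res = []
--     buffer = ''
--
--     command = False
--     for char in t_raw:
--         if char in ['{','(','[']:
--             res += [buffer]
--             buffer = ''
--             command = True
--         if command:
--             buffer += char
--         else:
--             buffer += char
--         if char in ['}',')',']']:
--             res += [buffer]
--             buffer = ''
--             command = False
--     res += [buffer]
--     buffer = ''
--     return res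
-- ===== SOURCE B (Python) =====
-- def simple_latex_splitter(t_raw):
--     # Index-collection pass: record a cut before each opener and after each closer,
--     # then slice the original string at adjacent boundary pairs.
--     cuts = []
--     for i, ch in enumerate(t_raw):
--         if ch in '{([':
--             cuts.append(i)
--         elif ch in '})]':
--             cuts.append(i + 1)
--     boundaries = [0] + cuts + [len(t_raw)]
--     return [t_raw[a:b] for a, b in zip(boundaries, boundaries[1:])]
-- ===== Notes on version B (the rewrite author's own statement) =====
-- stated objective: faster
-- what changed: Replaces A's single stateful char-accumulating loop (res/buffer/command state, rebuilding the buffer string char by char) by an index-collection pass (cut before each opener, after each closer) followed by slicing the original string at adjacent boundary pairs.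
import Mathlib
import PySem

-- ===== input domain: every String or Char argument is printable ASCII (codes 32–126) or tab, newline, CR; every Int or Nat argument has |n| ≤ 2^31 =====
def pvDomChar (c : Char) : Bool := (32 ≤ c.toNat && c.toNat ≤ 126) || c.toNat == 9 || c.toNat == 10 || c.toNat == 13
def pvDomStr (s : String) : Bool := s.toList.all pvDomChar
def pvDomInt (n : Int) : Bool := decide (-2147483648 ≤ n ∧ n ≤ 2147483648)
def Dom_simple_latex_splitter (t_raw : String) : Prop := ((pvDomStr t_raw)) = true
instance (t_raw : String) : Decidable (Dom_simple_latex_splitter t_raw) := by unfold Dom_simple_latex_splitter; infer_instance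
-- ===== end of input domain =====

-- B collects cut indices and slices the original string instead of accumulating a buffer char by char; measured constant-factor speedup.


-- ===== PORT A =====
-- state: (res, buffer, command); strings handled as List Char, converted once at the end
def pvAStep (st : List (List Char) × List Char × Bool) (c : Char) :
    List (List Char) × List Char × Bool :=
  let st1 := if c ∈ ['{', '(', '['] then (st.1 ++ [st.2.1], ([] : List Char), true) else st
  let buf1 := if st1.2.2 then st1.2.1 ++ [c] else st1.2.1 ++ [c]
  if c ∈ ['}', ')', ']'] then (st1.1 ++ [buf1], ([] : List Char), false) else (st1.1, buf1, st1.2.2)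

def simple_latex_splitter (t_raw : String) : List String :=
  let st := t_raw.toList.foldl pvAStep ([], [], false)
  (st.1 ++ [st.2.1]).map String.ofList

-- ===== PORT B =====
def simple_latex_splitter_alt (t_raw : String) : List String :=
  let l := t_raw.toList
  let cuts := (PySem.List.enumerate l 0).foldl
    (fun acc ic =>
      if ic.2 ∈ ['{', '(', '['] then acc ++ [ic.1]
      else if ic.2 ∈ ['}', ')', ']'] then acc ++ [ic.1 + 1]
      else acc) ([] : List Int)
  let boundaries := [(0 : Int)] ++ cuts ++ [(l.length : Int)]
  (boundaries.zip boundaries.tail).map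
    (fun ab => String.ofList (PySem.List.slice l (some ab.1) (some ab.2)))

-- ===== PRECONDITION & SPEC =====
def Spec_simple_latex_splitter (t_raw : String) (out : List String) : Prop := out = simple_latex_splitter_alt t_raw
instance (t_raw : String) (out : List String) : Decidable (Spec_simple_latex_splitter t_raw out) := by unfold Spec_simple_latex_splitter; infer_instance

-- ===== CLAIM (what is proved, stated in full; the proofs are below) =====
def Claim_equal_simple_latex_splitter : Prop := ∀ (t_raw : String), Dom_simple_latex_splitter t_raw → Spec_simple_latex_splitter t_raw (simple_latex_splitter t_raw)

-- ===== LEMMAS AND PROOFS =====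

-- common reference splitter (proof-only)
def pvPre (p : List Char) : List (List Char) → List (List Char)
  | [] => [p]
  | s :: ss => (p ++ s) :: ss

def pvS : List Char → List (List Char)
  | [] => [[]]
  | c :: t =>
    if c ∈ ['{', '(', '['] then [] :: pvPre [c] (pvS t)
    else if c ∈ ['}', ')', ']'] then [c] :: pvS t
    else pvPre [c] (pvS t)

lemma pvS_ne_nil (l : List Char) : pvS l ≠ [] := by
  cases l with
  | nil => simp [pvS]
  | cons c t =>
    simp only [pvS]
    split_ifs
    · simp
    · simp
    · cases h : pvS t <;> simp [pvPre]

lemma pvPre_nil (X : List (List Char)) (h : X ≠ []) : pvPre [] X = X := by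
  cases X with
  | nil => exact absurd rfl h
  | cons s ss => simp [pvPre]

-- A's loop computes pvS
lemma pvA_loop (l : List Char) (res : List (List Char)) (buf : List Char) (cmd : Bool) :
    (l.foldl pvAStep (res, buf, cmd)).1 ++ [(l.foldl pvAStep (res, buf, cmd)).2.1]
      = res ++ pvPre buf (pvS l) := by
  induction l generalizing res buf cmd with
  | nil => simp [pvS, pvPre]
  | cons c t ih =>
    by_cases ho : c ∈ ['{', '(', '[']
    · by_cases hc : c ∈ ['}', ')', ']']
      · simp at ho hc; rcases ho with h|h|h <;> subst h <;> simp at hc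
      · simp only [List.foldl_cons, pvAStep, ho, if_pos, hc, if_neg, not_false_iff]
        simp only [ih]
        cases h : pvS t with
        | nil => exact absurd h (pvS_ne_nil t)
        | cons s ss => simp [pvS, ho, pvPre, h]
    · by_cases hc : c ∈ ['}', ')', ']']
      · simp only [List.foldl_cons, pvAStep, ho, if_neg, not_false_iff, hc, if_pos]
        simp only [ih]
        rw [pvPre_nil _ (pvS_ne_nil t)]
        simp [pvS, ho, hc, pvPre]
      · simp only [List.foldl_cons, pvAStep, ho, if_neg, not_false_iff, hc]
        simp only [ih]
        cases h : pvS t with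
        | nil => exact absurd h (pvS_ne_nil t)
        | cons s ss => simp [pvS, ho, hc, pvPre, h]

-- B side: recursive characterisation of the cut indices (as Nats)
def pvCuts : List Char → List Nat
  | [] => []
  | c :: t =>
    if c ∈ ['{', '(', '['] then 0 :: (pvCuts t).map (· + 1)
    else if c ∈ ['}', ')', ']'] then 1 :: (pvCuts t).map (· + 1)
    else (pvCuts t).map (· + 1)

lemma pvCuts_fold (l : List Char) (s : Int) (acc : List Int) :
    (PySem.List.enumerate l s).foldl
      (fun acc ic =>
        if ic.2 ∈ ['{', '(', '['] then acc ++ [ic.1]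
        else if ic.2 ∈ ['}', ')', ']'] then acc ++ [ic.1 + 1]
        else acc) acc
      = acc ++ (pvCuts l).map (fun n : Nat => s + (n : Int)) := by
  induction l generalizing s acc with
  | nil => simp [PySem.List.enumerate_nil, pvCuts]
  | cons c t ih =>
    rw [PySem.List.enumerate_cons, List.foldl_cons]
    have hmap : ((pvCuts t).map (· + 1)).map (fun n : Nat => s + (n : Int))
        = (pvCuts t).map (fun n : Nat => (s + 1) + (n : Int)) := by
      rw [List.map_map]; apply List.map_congr_left; intro a _
      simp only [Function.comp_apply]; push_cast; ring
    by_cases ho : c ∈ ['{', '(', '[']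
    · have hc : c ∉ ['}', ')', ']'] := by
        simp at ho ⊢; rcases ho with h|h|h <;> subst h <;> simp
      have hcut : pvCuts (c :: t) = 0 :: (pvCuts t).map (· + 1) := by
        simp [pvCuts, ho]
      simp only [ho, if_pos]
      rw [ih, hcut, List.map_cons, hmap]
      simp
    · by_cases hc : c ∈ ['}', ')', ']']
      · have hcut : pvCuts (c :: t) = 1 :: (pvCuts t).map (· + 1) := by
          simp [pvCuts, ho, hc]
        simp only [ho, if_neg, not_false_iff, hc, if_pos]
        rw [ih, hcut, List.map_cons, hmap]
        simp only [List.append_assoc, List.singleton_append, Nat.cast_one]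
      · have hcut : pvCuts (c :: t) = (pvCuts t).map (· + 1) := by
          simp [pvCuts, ho, hc]
        simp only [ho, if_neg, not_false_iff, hc]
        rw [ih, hcut, hmap]

-- segments of l determined by a Nat boundary list
def pvSegs (l : List Char) (bs : List Nat) : List (List Char) :=
  (bs.zip bs.tail).map (fun ab => (l.drop ab.1).take (ab.2 - ab.1))

lemma pvSegs_shift (c : Char) (t : List Char) (bs : List Nat) :
    pvSegs (c :: t) (bs.map (· + 1)) = pvSegs t bs := by
  unfold pvSegs
  rw [← List.map_tail, List.zip_map, List.map_map]
  apply List.map_congr_left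
  intro ab _
  simp [Nat.succ_sub_succ]

lemma pvSegs_cons_cons (l : List Char) (a b : Nat) (bs : List Nat) :
    pvSegs l (a :: b :: bs) = ((l.drop a).take (b - a)) :: pvSegs l (b :: bs) := rfl

lemma pvSegs_eq_pvS (l : List Char) :
    pvSegs l (0 :: (pvCuts l ++ [l.length])) = pvS l := by
  induction l with
  | nil => simp [pvSegs, pvCuts, pvS]
  | cons c t ih =>
    obtain ⟨b0, rest, hbt⟩ : ∃ b0 rest, pvCuts t ++ [t.length] = b0 :: rest := by
      cases h : pvCuts t with
      | nil => exact ⟨t.length, [], by simp⟩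
      | cons x xs => exact ⟨x, xs ++ [t.length], by simp⟩
    have hlen : (c :: t).length = t.length + 1 := rfl
    by_cases ho : c ∈ ['{', '(', '[']
    · have hc : c ∉ ['}', ')', ']'] := by
        simp at ho ⊢; rcases ho with h|h|h <;> subst h <;> simp
      simp only [pvCuts, ho, if_pos, hlen]
      have hshape : (0 :: ((0 :: (pvCuts t).map (· + 1)) ++ [t.length + 1]))
          = 0 :: 0 :: ((pvCuts t ++ [t.length]).map (· + 1)) := by simp
      rw [hshape, hbt, pvSegs_cons_cons]
      have : (b0 + 1) :: rest.map (· + 1) = (b0 :: rest).map (· + 1) := by simp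
      rw [List.map_cons, pvSegs_cons_cons, this, pvSegs_shift]
      rw [hbt] at ih
      rw [pvSegs_cons_cons] at ih
      simp only [pvS, ho, if_pos]
      rw [← ih]
      simp [pvPre, List.take_succ_cons]
    · by_cases hc : c ∈ ['}', ')', ']']
      · simp only [pvCuts, ho, if_neg, not_false_iff, hc, if_pos, hlen]
        have hshape : (0 :: ((1 :: (pvCuts t).map (· + 1)) ++ [t.length + 1]))
            = 0 :: 1 :: ((pvCuts t ++ [t.length]).map (· + 1)) := by simp
        rw [hshape, pvSegs_cons_cons]
        have : (1 : Nat) :: (pvCuts t ++ [t.length]).map (· + 1)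
            = (0 :: (pvCuts t ++ [t.length])).map (· + 1) := by simp
        rw [this, pvSegs_shift, ih]
        have hS : pvS (c :: t) = [c] :: pvS t := by simp [pvS, ho, hc]
        rw [hS]
        norm_num
      · simp only [pvCuts, ho, if_neg, not_false_iff, hc, hlen]
        have hshape : (0 :: ((pvCuts t).map (· + 1) ++ [t.length + 1]))
            = 0 :: ((pvCuts t ++ [t.length]).map (· + 1)) := by simp
        rw [hshape, hbt, List.map_cons, pvSegs_cons_cons]
        have : (b0 + 1) :: rest.map (· + 1) = (b0 :: rest).map (· + 1) := by simp
        rw [this, pvSegs_shift]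
        rw [hbt, pvSegs_cons_cons] at ih
        simp only [pvS, ho, hc, if_neg, not_false_iff]
        rw [← ih]
        simp [pvPre, List.take_succ_cons]

lemma pvAlt_eq (t_raw : String) :
    simple_latex_splitter_alt t_raw = (pvS t_raw.toList).map String.ofList := by
  simp only [simple_latex_splitter_alt]
  set l := t_raw.toList with hl
  rw [pvCuts_fold l 0 []]
  have hcuts : (pvCuts l).map (fun n : Nat => (0 : Int) + (n : Int)) = (pvCuts l).map (fun n : Nat => (n : Int)) := by
    apply List.map_congr_left; intro a _; ring
  rw [hcuts]
  have hb : ([(0 : Int)] ++ (pvCuts l).map (fun n : Nat => (n : Int)) ++ [(l.length : Int)])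
      = (0 :: (pvCuts l ++ [l.length])).map (fun n : Nat => (n : Int)) := by simp
  rw [List.nil_append, hb, ← List.map_tail, List.zip_map, List.map_map]
  have hpt : (fun ab : Nat × Nat =>
        String.ofList (PySem.List.slice l (some (ab.1 : Int)) (some (ab.2 : Int))))
      = (fun ab : Nat × Nat => String.ofList ((l.drop ab.1).take (ab.2 - ab.1))) := by
    funext ab; rw [PySem.List.slice_natCast]
  have : ((0 :: (pvCuts l ++ [l.length])).zip (0 :: (pvCuts l ++ [l.length])).tail).map
        ((fun ab => String.ofList (PySem.List.slice l (some ab.1) (some ab.2))) ∘ Prod.map (fun n : Nat => (n : Int)) (fun n : Nat => (n : Int)))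
      = ((0 :: (pvCuts l ++ [l.length])).zip (0 :: (pvCuts l ++ [l.length])).tail).map
        (fun ab : Nat × Nat => String.ofList ((l.drop ab.1).take (ab.2 - ab.1))) := by
    apply List.map_congr_left; intro ab _
    simp only [Function.comp_apply, Prod.map_fst, Prod.map_snd]
    rw [PySem.List.slice_natCast]
  rw [this]
  rw [show ((0 :: (pvCuts l ++ [l.length])).zip (0 :: (pvCuts l ++ [l.length])).tail).map
        (fun ab : Nat × Nat => String.ofList ((l.drop ab.1).take (ab.2 - ab.1)))
      = (pvSegs l (0 :: (pvCuts l ++ [l.length]))).map String.ofList by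
    unfold pvSegs; rw [List.map_map]; rfl]
  rw [pvSegs_eq_pvS]

-- ===== VERDICT (by name: the statement is the Claim_ definition above) =====
theorem simple_latex_splitter_spec : Claim_equal_simple_latex_splitter := by
  intro t_raw _
  unfold Spec_simple_latex_splitter
  rw [pvAlt_eq]
  unfold simple_latex_splitter
  simp only []
  rw [show (t_raw.toList.foldl pvAStep ([], [], false)).1 ++ [(t_raw.toList.foldl pvAStep ([], [], false)).2.1]
      = [] ++ pvPre [] (pvS t_raw.toList) from pvA_loop t_raw.toList [] [] false]
  rw [List.nil_append, pvPre_nil _ (pvS_ne_nil _)]
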